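-- pv_equiv track=rewrite | github.com/linkxzhou/SimpleAgent | src/cli.py | suggest_similar_command
-- ===== SOURCE A (Python) =====
-- def levenshtein_distance(s1: str, s2: str) -> int:
--     """计算两个字符串之间的 Levenshtein 距离（编辑距离）。
--
--     Args:
--         s1: 第一个字符串
--         s2: 第二个字符串
--
--     Returns:
--         最小编辑次数（插入、删除、替换）
--     """
--     if len(s1) < len(s2):
--         return levenshtein_distance(s2, s1)
--
--     if len(s2) == 0:
--         return len(s1)
--
--     previous_row = range(len(s2) + 1)
--     for i, c1 in enumerate(s1):
--         current_row = [i + 1]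
--         for j, c2 in enumerate(s2):
--             # 插入、删除、替换的成本
--             insertions = previous_row[j + 1] + 1
--             deletions = current_row[j] + 1
--             substitutions = previous_row[j] + (c1 != c2)
--             current_row.append(min(insertions, deletions, substitutions))
--         previous_row = current_row
--
--     return previous_row[-1]
--
-- def suggest_similar_command(unknown_cmd: str) -> str | None:
--     """根据未知命令建议最相似的可用命令。
--
--     Args:
--         unknown_cmd: 用户输入的未知命令（包含 '/' 前缀）
--
--     Returns:
--         最相似的命令（如果距离 <= 2），否则 None
--     """
--     available_commands = [
--         '/help', '/quit', '/exit', '/clear', '/model', '/usage',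
--         '/compact', '/undo', '/diff', '/commit', '/save', '/load',
--         '/replay', '/spec'
--     ]
--
--     min_distance = float('inf')
--     best_match = None
--
--     for cmd in available_commands:
--         distance = levenshtein_distance(unknown_cmd, cmd)
--         if distance < min_distance:
--             min_distance = distance
--             best_match = cmd
--
--     # 只在距离较小时返回建议（避免完全无关的建议）
--     return best_match if min_distance <= 2 else None
-- ===== SOURCE B (Python) =====
-- from functools import lru_cache
--
--
-- def _edit_distance(s1: str, s2: str) -> int:
--     """Edit distance via top-down memoized recursion on prefix lengths."""
--     @lru_cache(maxsize=None)
--     def edit(i: int, j: int) -> int: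
--         if i == 0:
--             return j
--         if j == 0:
--             return i
--         return min(edit(i - 1, j) + 1,
--                    edit(i, j - 1) + 1,
--                    edit(i - 1, j - 1) + (s1[i - 1] != s2[j - 1]))
--     # warm the cache in chunks so recursion depth stays bounded on long inputs
--     for i in range(0, len(s1), 64):
--         edit(i, len(s2))
--     return edit(len(s1), len(s2))
--
--
-- def suggest_similar_command(unknown_cmd: str) -> str | None:
--     available_commands = [
--         '/help', '/quit', '/exit', '/clear', '/model', '/usage',
--         '/compact', '/undo', '/diff', '/commit', '/save', '/load',
--         '/replay', '/spec'
--     ]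
--     best = min(available_commands, key=lambda c: _edit_distance(unknown_cmd, c))
--     return best if _edit_distance(unknown_cmd, best) <= 2 else None
-- ===== Notes on version B (the rewrite author's own statement) =====
-- stated objective: alternative
-- what changed: Replaces the bottom-up rolling-row DP (with its argument swap) by top-down memoized recursion on prefix lengths, and replaces the explicit min-tracking loop by min(..., key=...) which keeps the first command on ties.
import Mathlib
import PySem

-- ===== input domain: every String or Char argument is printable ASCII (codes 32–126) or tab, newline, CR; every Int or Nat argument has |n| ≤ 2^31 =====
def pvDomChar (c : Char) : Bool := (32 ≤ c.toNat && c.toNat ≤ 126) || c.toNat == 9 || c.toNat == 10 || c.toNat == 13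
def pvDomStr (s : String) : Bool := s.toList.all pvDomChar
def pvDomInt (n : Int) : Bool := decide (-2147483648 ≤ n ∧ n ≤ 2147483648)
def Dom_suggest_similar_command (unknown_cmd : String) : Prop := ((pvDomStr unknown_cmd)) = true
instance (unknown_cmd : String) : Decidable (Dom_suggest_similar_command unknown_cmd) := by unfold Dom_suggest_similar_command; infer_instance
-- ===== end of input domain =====

-- B replaces A's bottom-up rolling-row DP (with argument swap) by top-down recursion on
-- prefix lengths and a first-wins min-scan; objective: alternative (same asymptotic cost).


-- ===== PORT A =====
-- inner-loop body of A's DP (one cell append), named so the fold is readable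
def levInnerStep (s2 : List Char) (previous_row : List Nat) (c1 : Char)
    (current_row : List Nat) (j : Nat) : List Nat :=
  let c2 := s2.getD j ' '
  let insertions := previous_row.getD (j + 1) 0 + 1
  let deletions := current_row.getD j 0 + 1
  let substitutions := previous_row.getD j 0 + (if c1 ≠ c2 then 1 else 0)
  current_row ++ [min insertions (min deletions substitutions)]

-- outer-loop body: builds current_row from previous_row (A's `for i, c1 in enumerate(s1)`)
def levOuterStep (s1 s2 : List Char) (previous_row : List Nat) (i : Nat) : List Nat :=
  (List.range s2.length).foldl (levInnerStep s2 previous_row (s1.getD i ' ')) [i + 1]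

def levenshtein_distance (s1 s2 : List Char) : Nat :=
  if s1.length < s2.length then levenshtein_distance s2 s1
  else if s2.length = 0 then s1.length
  else
    (((List.range s1.length).foldl (levOuterStep s1 s2)
        (List.range (s2.length + 1))).getLast?).getD 0
termination_by (if s1.length < s2.length then 1 else 0)
decreasing_by simp_all [Nat.not_lt.mpr (Nat.le_of_lt (by assumption))]

-- loop body of A's min-tracking scan (min_distance = none means float('inf'))
def suggestStep (unknown_cmd : String) (st : Option Nat × Option String) (cmd : String) :
    Option Nat × Option String :=
  let distance := levenshtein_distance unknown_cmd.toList cmd.toList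
  match st.1 with
  | none => (some distance, some cmd)
  | some m => if distance < m then (some distance, some cmd) else st

def suggest_similar_command (unknown_cmd : String) : Option String :=
  let available_commands : List String :=
    ["/help", "/quit", "/exit", "/clear", "/model", "/usage",
     "/compact", "/undo", "/diff", "/commit", "/save", "/load",
     "/replay", "/spec"]
  let st := available_commands.foldl (suggestStep unknown_cmd) (none, none)
  match st.1 with
  | some m => if m ≤ 2 then st.2 else none
  | none => none

-- ===== PORT B =====
-- B's memoized recursion edit(i, j) (distance between s1[:i] and s2[:j]); the lru_cache is
-- ported faithfully as a threaded dict: look up (i, j) first, store every computed value.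
def editMemo (s1 s2 : List Char) (i j : Nat) (cache : PySem.Dict (Nat × Nat) Nat) :
    Nat × PySem.Dict (Nat × Nat) Nat :=
  match cache.get? (i, j) with
  | some v => (v, cache)
  | none =>
    let r : Nat × PySem.Dict (Nat × Nat) Nat :=
      match i, j with
      | 0, j => (j, cache)
      | i + 1, 0 => (i + 1, cache)
      | i + 1, j + 1 =>
        let ra := editMemo s1 s2 i (j + 1) cache
        let rb := editMemo s1 s2 (i + 1) j ra.2
        let rc := editMemo s1 s2 i j rb.2
        (min (ra.1 + 1) (min (rb.1 + 1)
          (rc.1 + (if s1.getD i ' ' ≠ s2.getD j ' ' then 1 else 0))), rc.2)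
    (r.1, r.2.insert (i, j) r.1)
termination_by i + j
decreasing_by all_goals omega

-- B warms the cache in chunks of 64 (bounds Python's recursion depth); same values
def edit_distance (s1 s2 : String) : Nat :=
  let cache := (PySem.List.pyRange 0 s1.toList.length 64).foldl
      (fun cache i => (editMemo s1.toList s2.toList i.toNat s2.toList.length cache).2)
      PySem.Dict.empty
  (editMemo s1.toList s2.toList s1.toList.length s2.toList.length cache).1

-- body of B's min(..., key=...): keep first element on ties
def bestStep (unknown_cmd : String) (b c : String) : String :=
  if edit_distance unknown_cmd c < edit_distance unknown_cmd b then c else b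

def suggest_similar_command_alt (unknown_cmd : String) : Option String :=
  let available_commands : List String :=
    ["/help", "/quit", "/exit", "/clear", "/model", "/usage",
     "/compact", "/undo", "/diff", "/commit", "/save", "/load",
     "/replay", "/spec"]
  let best := available_commands.tail.foldl (bestStep unknown_cmd) (available_commands.headD "")
  if edit_distance unknown_cmd best ≤ 2 then some best else none

-- ===== PRECONDITION & SPEC =====
def Spec_suggest_similar_command (unknown_cmd : String) (out : Option String) : Prop := out = suggest_similar_command_alt unknown_cmd
instance (unknown_cmd : String) (out : Option String) : Decidable (Spec_suggest_similar_command unknown_cmd out) := by unfold Spec_suggest_similar_command; infer_instance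

-- ===== CLAIM (what is proved, stated in full; the proofs are below) =====
def Claim_equal_suggest_similar_command : Prop := ∀ (unknown_cmd : String), Dom_suggest_similar_command unknown_cmd → Spec_suggest_similar_command unknown_cmd (suggest_similar_command unknown_cmd)

-- ===== LEMMAS AND PROOFS =====

-- proof-side specification of the edit distance (the value edit(i, j) computes)
def pyEdit (s1 s2 : List Char) : Nat → Nat → Nat
  | 0, j => j
  | i + 1, 0 => i + 1
  | i + 1, j + 1 =>
      min (pyEdit s1 s2 i (j + 1) + 1)
        (min (pyEdit s1 s2 (i + 1) j + 1)
          (pyEdit s1 s2 i j + (if s1.getD i ' ' ≠ s2.getD j ' ' then 1 else 0)))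

def CacheOK (s t : List Char) (cache : PySem.Dict (Nat × Nat) Nat) : Prop :=
  ∀ i j v, cache.get? (i, j) = some v → v = pyEdit s t i j

theorem cacheOK_insert {s t : List Char} {cache : PySem.Dict (Nat × Nat) Nat}
    (h : CacheOK s t cache) {i j v : Nat} (hv : v = pyEdit s t i j) :
    CacheOK s t (cache.insert (i, j) v) := by
  intro i' j' w hw
  rw [PySem.Dict.get?_insert] at hw
  by_cases hp : ((i', j') : Nat × Nat) = (i, j)
  · rw [if_pos hp] at hw
    obtain ⟨h1, h2⟩ := Prod.mk.injEq .. ▸ hp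
    cases hw; subst h1; subst h2; exact hv
  · rw [if_neg hp] at hw
    exact h i' j' w hw

theorem editMemo_correct (s t : List Char) (n : Nat) :
    ∀ i j (cache : PySem.Dict (Nat × Nat) Nat), i + j ≤ n → CacheOK s t cache →
      (editMemo s t i j cache).1 = pyEdit s t i j ∧
        CacheOK s t (editMemo s t i j cache).2 := by
  induction n with
  | zero =>
    intro i j cache hle h
    have hi : i = 0 := by omega
    have hj : j = 0 := by omega
    subst hi; subst hj
    rw [editMemo]
    cases hc : cache.get? ((0, 0) : Nat × Nat) with
    | some v => exact ⟨h 0 0 v hc, h⟩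
    | none =>
      exact ⟨by simp [pyEdit], cacheOK_insert h (by simp [pyEdit])⟩
  | succ n ih =>
    intro i j cache hle h
    rw [editMemo.eq_def]
    cases hc : cache.get? ((i, j) : Nat × Nat) with
    | some v => exact ⟨h i j v hc, h⟩
    | none =>
      match i, j with
      | 0, j => exact ⟨by simp [pyEdit], cacheOK_insert h (by simp [pyEdit])⟩
      | i + 1, 0 => exact ⟨by simp [pyEdit], cacheOK_insert h (by simp [pyEdit])⟩
      | i + 1, j + 1 =>
        obtain ⟨ea, ha⟩ := ih i (j + 1) cache (by omega) h
        obtain ⟨eb, hb⟩ := ih (i + 1) j _ (by omega) ha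
        obtain ⟨ec, hok⟩ := ih i j _ (by omega) hb
        have hval : min ((editMemo s t i (j + 1) cache).1 + 1)
            (min ((editMemo s t (i + 1) j (editMemo s t i (j + 1) cache).2).1 + 1)
              ((editMemo s t i j
                  (editMemo s t (i + 1) j (editMemo s t i (j + 1) cache).2).2).1 +
                (if s.getD i ' ' ≠ t.getD j ' ' then 1 else 0)))
            = pyEdit s t (i + 1) (j + 1) := by
          rw [ea, eb, ec]; simp [pyEdit]
        exact ⟨hval, cacheOK_insert hok hval⟩

theorem pyEdit_zero_right (s t : List Char) (i : Nat) : pyEdit s t i 0 = i := by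
  cases i <;> simp [pyEdit]

theorem pyEdit_zero_left (s t : List Char) (j : Nat) : pyEdit s t 0 j = j := by
  cases j <;> simp [pyEdit]

theorem pyEdit_symm (s t : List Char) (i j : Nat) : pyEdit s t i j = pyEdit t s j i := by
  induction i generalizing j with
  | zero => rw [pyEdit_zero_left, pyEdit_zero_right]
  | succ i ih =>
    induction j with
    | zero => rw [pyEdit_zero_right, pyEdit_zero_left]
    | succ j ihj =>
      simp only [pyEdit]
      rw [ih (j + 1), ihj, ih j]
      have hc : (if s.getD i ' ' ≠ t.getD j ' ' then 1 else 0)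
          = (if t.getD j ' ' ≠ s.getD i ' ' then (1:Nat) else 0) := by
        by_cases h : s.getD i ' ' = t.getD j ' ' <;> simp [Ne, eq_comm]
      rw [hc]; omega

theorem getD_map_range (f : Nat → Nat) (k m : Nat) (h : m < k) :
    ((List.range k).map f).getD m 0 = f m := by
  rw [List.getD_eq_getElem?_getD]
  simp [h]

theorem inner_invariant (s t : List Char) (i j : Nat) (hj : j ≤ t.length) :
    (List.range j).foldl
        (levInnerStep t ((List.range (t.length + 1)).map (pyEdit s t i)) (s.getD i ' '))
        [i + 1]
      = (List.range (j + 1)).map (pyEdit s t (i + 1)) := by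
  induction j with
  | zero => simp [List.range_succ, pyEdit_zero_right]
  | succ j ih =>
    have hj' : j ≤ t.length := Nat.le_of_succ_le hj
    rw [show List.range (j + 1) = List.range j ++ [j] from List.range_succ,
        List.foldl_append, ih hj']
    simp only [List.foldl_cons, List.foldl_nil, levInnerStep]
    rw [getD_map_range _ _ _ (by omega), getD_map_range _ _ _ (by omega),
        getD_map_range _ _ _ (by omega)]
    rw [show List.range (j + 1 + 1) = List.range (j + 1) ++ [j + 1] from List.range_succ,
        List.map_append]
    simp [pyEdit]

theorem outer_invariant (s t : List Char) (i : Nat) (hi : i ≤ s.length) :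
    (List.range i).foldl (levOuterStep s t) (List.range (t.length + 1))
      = (List.range (t.length + 1)).map (pyEdit s t i) := by
  induction i with
  | zero =>
    rw [show (List.range (t.length + 1)).map (pyEdit s t 0)
          = (List.range (t.length + 1)).map id from
        List.map_congr_left (fun x _ => pyEdit_zero_left s t x), List.map_id]
    simp
  | succ i ih =>
    rw [show List.range (i + 1) = List.range i ++ [i] from List.range_succ,
        List.foldl_append, ih (Nat.le_of_succ_le hi)]
    simp only [List.foldl_cons, List.foldl_nil, levOuterStep]
    exact inner_invariant s t i t.length (Nat.le_refl _)

theorem getLast_map_range (f : Nat → Nat) (k : Nat) :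
    (((List.range (k + 1)).map f).getLast?).getD 0 = f k := by
  rw [List.range_succ, List.map_append]
  simp

theorem lev_eq_of_ge (s t : List Char) (h : ¬ s.length < t.length) :
    levenshtein_distance s t = pyEdit s t s.length t.length := by
  rw [levenshtein_distance, if_neg h]
  by_cases h0 : t.length = 0
  · rw [if_pos h0, h0, pyEdit_zero_right]
  · rw [if_neg h0, outer_invariant s t s.length (Nat.le_refl _), getLast_map_range]

theorem lev_eq (s t : List Char) :
    levenshtein_distance s t = pyEdit s t s.length t.length := by
  by_cases h : s.length < t.length
  · rw [levenshtein_distance, if_pos h,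
        lev_eq_of_ge t s (by omega), pyEdit_symm]
  · exact lev_eq_of_ge s t h

theorem cacheOK_empty (s t : List Char) : CacheOK s t PySem.Dict.empty := by
  intro i j v hv
  rw [PySem.Dict.get?_empty] at hv
  cases hv

theorem cacheOK_foldl (s t : List Char) (l : List Int)
    (cache : PySem.Dict (Nat × Nat) Nat) (h : CacheOK s t cache) :
    CacheOK s t (l.foldl (fun cache i => (editMemo s t i.toNat t.length cache).2) cache) := by
  induction l generalizing cache with
  | nil => exact h
  | cons i l ih =>
    exact ih _ ((editMemo_correct s t (i.toNat + t.length) i.toNat t.length cache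
      (Nat.le_refl _) h).2)

theorem lev_eq_edit (u x : String) :
    levenshtein_distance u.toList x.toList = edit_distance u x := by
  rw [lev_eq, edit_distance]
  exact ((editMemo_correct u.toList x.toList (u.toList.length + x.toList.length)
      u.toList.length x.toList.length _ (Nat.le_refl _)
      (cacheOK_foldl _ _ _ _ (cacheOK_empty _ _))).1).symm

theorem scan_invariant (u : String) (l : List String) (b : String) :
    l.foldl (suggestStep u) (some (edit_distance u b), some b)
      = (some (edit_distance u (l.foldl (bestStep u) b)), some (l.foldl (bestStep u) b)) := by
  induction l generalizing b with
  | nil => rfl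
  | cons c l ih =>
    simp only [List.foldl_cons]
    have hstep : suggestStep u (some (edit_distance u b), some b) c
        = (some (edit_distance u (bestStep u b c)), some (bestStep u b c)) := by
      simp only [suggestStep, bestStep, lev_eq_edit]
      by_cases h : edit_distance u c < edit_distance u b <;> simp [h]
    rw [hstep, ih]

-- ===== VERDICT (by name: the statement is the Claim_ definition above) =====
theorem suggest_similar_command_spec : Claim_equal_suggest_similar_command := by
  intro u _
  show suggest_similar_command u = suggest_similar_command_alt u
  simp only [suggest_similar_command, suggest_similar_command_alt,
    List.tail_cons, List.headD_cons]
  rw [List.foldl_cons,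
      show suggestStep u (none, none) "/help"
          = (some (edit_distance u "/help"), some "/help") by
        simp only [suggestStep]; rw [lev_eq_edit],
      scan_invariant]
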